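-- pv_equiv track=rewrite | github.com/wtalioy/ChainBench | scripts/eval/metrics/delivery.py | is_adjacent_order_swap
-- ===== SOURCE A (Python) =====
-- def is_adjacent_order_swap(tokens_a: list[str], tokens_b: list[str]) -> bool:
--     if len(tokens_a) != len(tokens_b) or len(tokens_a) < 2:
--         return False
--     diffs = [index for index, (left, right) in enumerate(zip(tokens_a, tokens_b)) if left != right]
--     if len(diffs) != 2:
--         return False
--     left_index, right_index = diffs
--     if right_index != left_index + 1:
--         return False
--     swapped = list(tokens_a)
--     swapped[left_index], swapped[right_index] = swapped[right_index], swapped[left_index]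
--     return swapped == tokens_b
-- ===== SOURCE B (Python) =====
-- def is_adjacent_order_swap(tokens_a: list[str], tokens_b: list[str]) -> bool:
--     n = len(tokens_a)
--     if n != len(tokens_b):
--         return False
--     i = 0
--     while i + 1 < n and tokens_a[i] == tokens_b[i]:
--         i += 1
--     if i + 1 >= n:
--         return False
--     return (tokens_a[i] == tokens_b[i + 1]
--             and tokens_a[i + 1] == tokens_b[i]
--             and tokens_a[i + 2:] == tokens_b[i + 2:])
-- ===== Notes on version B (the rewrite author's own statement) =====
-- stated objective: simpler
-- what changed: Replaces A's full diff-index list comprehension and the reconstructed swapped copy by a single scan to the first mismatch followed by direct cross-comparison of the two neighbours and an equality check of the remaining tails.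
import Mathlib
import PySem

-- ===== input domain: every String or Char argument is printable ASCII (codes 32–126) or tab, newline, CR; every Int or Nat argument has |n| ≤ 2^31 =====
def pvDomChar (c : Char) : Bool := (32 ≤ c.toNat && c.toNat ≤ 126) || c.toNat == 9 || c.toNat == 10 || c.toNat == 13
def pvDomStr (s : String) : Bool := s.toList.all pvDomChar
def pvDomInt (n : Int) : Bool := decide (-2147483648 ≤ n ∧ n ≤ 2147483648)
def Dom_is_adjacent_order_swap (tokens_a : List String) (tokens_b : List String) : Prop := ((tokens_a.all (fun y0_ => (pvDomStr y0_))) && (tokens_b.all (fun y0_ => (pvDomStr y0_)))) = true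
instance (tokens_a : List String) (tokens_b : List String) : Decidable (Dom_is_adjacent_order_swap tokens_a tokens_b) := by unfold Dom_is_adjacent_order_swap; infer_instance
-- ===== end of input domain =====

-- B replaces A's diff-index list comprehension and the reconstructed swapped copy by a single
-- scan to the first mismatch plus direct neighbour comparisons (objective: simpler; same O(n)).

-- ===== PORT A =====
-- literal transliteration of A: length guards, the diff-index list built by
-- enumerate(zip(...)) + filter, the unpacking `left_index, right_index = diffs`
-- (which requires len(diffs) == 2, checked just before), the adjacency test, and the
-- swapped copy built with a tuple assignment (both RHS reads see the original list).
def is_adjacent_order_swap (tokens_a : List String) (tokens_b : List String) : Bool :=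
  if tokens_a.length ≠ tokens_b.length ∨ tokens_a.length < 2 then false
  else
    let diffs : List Int :=
      ((PySem.List.enumerate (tokens_a.zip tokens_b) 0).filter
        (fun p => p.2.1 != p.2.2)).map (·.1)
    match diffs with
    | [left_index, right_index] =>
      if right_index ≠ left_index + 1 then false
      else
        let swapped :=
          PySem.List.pySetD
            (PySem.List.pySetD tokens_a left_index
              (PySem.List.pyGetD tokens_a right_index ""))
            right_index (PySem.List.pyGetD tokens_a left_index "")
        swapped == tokens_b
    | _ => false  -- len(diffs) != 2

-- ===== PORT B =====
-- the while loop `while i + 1 < n and tokens_a[i] == tokens_b[i]: i += 1` of Source B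
def pvScan (a b : List String) (n i : Nat) : Nat :=
  if h : i + 1 < n ∧ a.getD i "" = b.getD i "" then pvScan a b n (i + 1) else i
termination_by n - i
decreasing_by omega

-- transliteration of Source B; tokens_a[i+2:] is List.drop (exact for a nonnegative start,
-- PySem.List.slice_from_natCast)
def is_adjacent_order_swap_alt (tokens_a : List String) (tokens_b : List String) : Bool :=
  if tokens_a.length ≠ tokens_b.length then false
  else
    let n := tokens_a.length
    let i := pvScan tokens_a tokens_b n 0
    if i + 1 ≥ n then false
    else
      (tokens_a.getD i "" == tokens_b.getD (i + 1) "")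
        && (tokens_a.getD (i + 1) "" == tokens_b.getD i "")
        && (tokens_a.drop (i + 2) == tokens_b.drop (i + 2))

-- ===== PRECONDITION & SPEC =====
def Spec_is_adjacent_order_swap (tokens_a : List String) (tokens_b : List String) (out : Bool) : Prop := out = is_adjacent_order_swap_alt tokens_a tokens_b
instance (tokens_a : List String) (tokens_b : List String) (out : Bool) : Decidable (Spec_is_adjacent_order_swap tokens_a tokens_b out) := by unfold Spec_is_adjacent_order_swap; infer_instance

-- ===== CLAIM (what is proved, stated in full; the proofs are below) =====
def Claim_equal_is_adjacent_order_swap : Prop := ∀ (tokens_a : List String) (tokens_b : List String), Dom_is_adjacent_order_swap tokens_a tokens_b → Spec_is_adjacent_order_swap tokens_a tokens_b (is_adjacent_order_swap tokens_a tokens_b)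

-- ===== LEMMAS AND PROOFS =====

-- A's diff-index pipeline, as a named function of the start index of enumerate
def adiffs (a b : List String) (s : Int) : List Int :=
  ((PySem.List.enumerate (a.zip b) s).filter (fun p => p.2.1 != p.2.2)).map (·.1)

-- the same index list, structurally, over Nat
def adiffsN : List String → List String → List Nat
  | x :: a, y :: b =>
    if x = y then (adiffsN a b).map (· + 1) else 0 :: (adiffsN a b).map (· + 1)
  | _, _ => []

theorem adiffs_eq : ∀ (a b : List String) (s : Int),
    adiffs a b s = List.map (fun k : Nat => s + (k : Int)) (adiffsN a b) := by
  intro a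
  induction a with
  | nil => intro b s; cases b <;> simp [adiffs, adiffsN, PySem.List.enumerate_nil]
  | cons x a ih =>
    intro b s
    cases b with
    | nil => simp [adiffs, adiffsN, PySem.List.enumerate_nil]
    | cons y b =>
      simp only [adiffs, List.zip_cons_cons, PySem.List.enumerate_cons, List.filter_cons]
      have htail : ((PySem.List.enumerate (a.zip b) (s + 1)).filter
          (fun p => p.2.1 != p.2.2)).map (·.1) = adiffs a b (s + 1) := rfl
      by_cases hxy : x = y
      · rw [if_neg (by simp [hxy]), htail, ih,
          show adiffsN (x :: a) (y :: b) = (adiffsN a b).map (· + 1) from by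
            rw [adiffsN, if_pos hxy],
          List.map_map]
        apply List.map_congr_left
        intro k _
        simp only [Function.comp]
        push_cast; ring
      · rw [if_pos (by simpa [bne_iff_ne] using hxy), List.map_cons, htail, ih,
          show adiffsN (x :: a) (y :: b) = 0 :: (adiffsN a b).map (· + 1) from by
            rw [adiffsN, if_neg hxy],
          List.map_cons, List.map_map]
        simp only [Nat.cast_zero, add_zero, List.cons.injEq, true_and]
        apply List.map_congr_left
        intro k _
        simp only [Function.comp]
        push_cast; ring

theorem adiffsN_nil_iff : ∀ (a b : List String), a.length = b.length →
    (adiffsN a b = [] ↔ a = b) := by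
  intro a
  induction a with
  | nil => intro b h; cases b <;> simp [adiffsN] at h ⊢
  | cons x a ih =>
    intro b h
    cases b with
    | nil => simp at h
    | cons y b =>
      simp at h
      by_cases hxy : x = y
      · simp [adiffsN, hxy, ih b h]
      · simp [adiffsN, hxy]

-- A's core, after rewriting the pipeline through adiffsN and removing the Int casts
def Acore (a b : List String) : Bool :=
  match adiffsN a b with
  | [l, r] =>
    if r ≠ l + 1 then false
    else ((a.set l (a.getD r "")).set r (a.getD l "")) == b
  | _ => false

theorem adiffs_zero (a b : List String) :
    ((PySem.List.enumerate (a.zip b) 0).filter (fun p => p.2.1 != p.2.2)).map (·.1)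
      = List.map (fun k : Nat => (k : Int)) (adiffsN a b) := by
  rw [show ((PySem.List.enumerate (a.zip b) 0).filter (fun p => p.2.1 != p.2.2)).map (·.1)
      = adiffs a b 0 from rfl, adiffs_eq]
  simp

theorem A_eq_Acore (a b : List String) (hlen : a.length = b.length) (h2 : 2 ≤ a.length) :
    is_adjacent_order_swap a b = Acore a b := by
  simp only [is_adjacent_order_swap]
  rw [if_neg (by omega), adiffs_zero, Acore]
  cases hd : adiffsN a b with
  | nil => simp
  | cons l t =>
    cases t with
    | nil => simp
    | cons r t2 =>
      cases t2 with
      | nil =>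
        simp only [List.map_cons, List.map_nil]
        by_cases hadj : r = l + 1
        · rw [if_neg (by omega), if_neg (by omega)]
          simp [pysem]
        · rw [if_pos (by omega), if_pos hadj]
      | cons => simp

theorem pvScan_shift (x u : String) (a b : List String) :
    ∀ (m n i : Nat), n - i = m →
      pvScan (x :: a) (u :: b) (n + 1) (i + 1) = pvScan a b n i + 1 := by
  intro m
  induction m with
  | zero =>
    intro n i h
    conv_lhs => rw [pvScan]
    conv_rhs => rw [pvScan]
    rw [dif_neg (fun hc => absurd hc.1 (by omega)),
      dif_neg (fun hc => absurd hc.1 (by omega))]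
  | succ m ih =>
    intro n i h
    conv_lhs => rw [pvScan]
    conv_rhs => rw [pvScan]
    by_cases hc : i + 1 < n ∧ a.getD i "" = b.getD i ""
    · rw [dif_pos (by simp only [List.getD_cons_succ]; exact ⟨by omega, hc.2⟩),
        dif_pos hc, ih n (i + 1) (by omega)]
    · rw [dif_neg (by simp only [List.getD_cons_succ]; intro hcc; exact hc ⟨by omega, hcc.2⟩),
        dif_neg hc]

-- head-equal reduction for B
theorem B_cons_eq (x : String) (a b : List String) (hlen : a.length = b.length) :
    is_adjacent_order_swap_alt (x :: a) (x :: b) = is_adjacent_order_swap_alt a b := by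
  cases a with
  | nil =>
    have hb : b = [] := by cases b with | nil => rfl | cons => simp at hlen
    subst hb
    simp only [is_adjacent_order_swap_alt, List.length_cons, List.length_nil]
    split_ifs with h1 h2 h3 h4 <;> first | rfl | omega
  | cons y a' =>
    cases b with
    | nil => simp at hlen
    | cons v b' =>
      simp only [List.length_cons] at hlen
      simp only [is_adjacent_order_swap_alt, List.length_cons, hlen]
      have hstep : pvScan (x :: y :: a') (x :: v :: b') (b'.length + 1 + 1) 0
          = pvScan (y :: a') (v :: b') (b'.length + 1) 0 + 1 := by
        rw [pvScan, dif_pos ⟨by omega, by simp⟩]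
        exact pvScan_shift x x (y :: a') (v :: b') _ (b'.length + 1) 0 rfl
      rw [hstep]
      split_ifs with h1 h2 h3 h4 <;> first | rfl | omega

-- head-equal reduction for A
theorem A_cons_eq (x : String) (a b : List String) (hlen : a.length = b.length) :
    is_adjacent_order_swap (x :: a) (x :: b) = is_adjacent_order_swap a b := by
  by_cases h2 : 2 ≤ a.length
  · rw [A_eq_Acore (x :: a) (x :: b) (by simp [hlen]) (by simp; omega),
        A_eq_Acore a b hlen h2]
    simp only [Acore]
    rw [show adiffsN (x :: a) (x :: b) = (adiffsN a b).map (· + 1) from by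
      rw [adiffsN, if_pos rfl]]
    cases hd : adiffsN a b with
    | nil => simp
    | cons l t =>
      cases t with
      | nil => simp
      | cons r t2 =>
        cases t2 with
        | nil =>
          simp only [List.map_cons, List.map_nil]
          show (if r + 1 ≠ l + 1 + 1 then false
              else ((x :: a).set (l + 1) ((x :: a).getD (r + 1) "")).set (r + 1)
                ((x :: a).getD (l + 1) "") == x :: b)
            = (if r ≠ l + 1 then false
              else (a.set l (a.getD r "")).set r (a.getD l "") == b)
          by_cases hadj : r = l + 1
          · rw [if_neg (by omega), if_neg (by omega)]
            simp [List.set_cons_succ]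
          · rw [if_pos (by omega), if_pos hadj]
        | cons => simp
  · -- both lists too short for two diffs: both sides are false
    have hA2 : is_adjacent_order_swap a b = false := by
      rw [is_adjacent_order_swap, if_pos (Or.inr (by omega))]
    rw [hA2]
    cases a with
    | nil =>
      have hb : b = [] := by cases b with | nil => rfl | cons => simp at hlen
      subst hb
      rw [is_adjacent_order_swap, if_pos (Or.inr (by simp))]
    | cons y a' =>
      cases b with
      | nil => simp at hlen
      | cons v b' =>
        simp only [List.length_cons] at hlen h2
        have ha' : a' = [] := List.length_eq_zero_iff.mp (by omega)
        have hb' : b' = [] := List.length_eq_zero_iff.mp (by omega)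
        subst ha'; subst hb'
        rw [A_eq_Acore (x :: y :: []) (x :: v :: []) (by simp) (by simp)]
        by_cases hyv : y = v <;> simp [Acore, adiffsN, hyv]

-- both sides computed in the head-differ case
theorem A_cons_ne (x u : String) (a b : List String) (hlen : a.length = b.length)
    (hxu : x ≠ u) :
    is_adjacent_order_swap (x :: a) (u :: b)
      = (match a, b with
         | y :: a', v :: b' => (x == v) && (y == u) && (a' == b')
         | _, _ => false) := by
  cases a with
  | nil =>
    have hb : b = [] := by cases b with | nil => rfl | cons => simp at hlen
    subst hb
    rw [is_adjacent_order_swap, if_pos (Or.inr (by simp))]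
  | cons y a' =>
    cases b with
    | nil => simp at hlen
    | cons v b' =>
      simp only [List.length_cons] at hlen
      rw [A_eq_Acore (x :: y :: a') (u :: v :: b') (by simp [hlen]) (by simp)]
      simp only [Acore]
      rw [show adiffsN (x :: y :: a') (u :: v :: b')
          = 0 :: (adiffsN (y :: a') (v :: b')).map (· + 1) from by
        rw [adiffsN, if_neg hxu]]
      by_cases hyv : y = v
      · rw [show adiffsN (y :: a') (v :: b') = (adiffsN a' b').map (· + 1) from by
          rw [adiffsN, if_pos hyv]]
        cases hd : adiffsN a' b' with
        | nil =>
          -- only the first position differs: A sees a single diff index, so false;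
          -- B's conjunction is false too (x = v and y = u would force x = u)
          have ha'b' : a' = b' := (adiffsN_nil_iff a' b' (by omega)).mp hd
          subst ha'b'; subst hyv
          show false = ((x == y) && (y == u) && (a' == a'))
          by_cases hxv : x = y
          · by_cases hyu : y = u
            · exact absurd (hxv.trans hyu) hxu
            · simp [hyu]
          · simp [hxv]
        | cons l t =>
          have hne : a' ≠ b' := by
            intro he
            rw [he, (adiffsN_nil_iff b' b' rfl).mpr rfl] at hd
            simp at hd
          cases t with
          | nil =>
            simp only [List.map_cons, List.map_nil]
            show (if l + 1 + 1 ≠ 0 + 1 then false else _) = _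
            rw [if_pos (by omega)]
            simp [hne]
          | cons l2 t2 =>
            simp only [List.map_cons]
            show false = _
            simp [hne]
      · rw [show adiffsN (y :: a') (v :: b') = 0 :: (adiffsN a' b').map (· + 1) from by
          rw [adiffsN, if_neg hyv]]
        cases hd : adiffsN a' b' with
        | nil =>
          have ha'b' : a' = b' := (adiffsN_nil_iff a' b' (by omega)).mp hd
          subst ha'b'
          simp only [List.map_cons, List.map_nil]
          -- diffs = [0, 1]: the swapped copy is y :: x :: a'
          show (if (0 + 1 : Nat) ≠ 0 + 1 then false
              else ((x :: y :: a').set 0 ((x :: y :: a').getD (0 + 1) "")).set (0 + 1)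
                ((x :: y :: a').getD 0 "") == u :: v :: a')
            = ((x == v) && (y == u) && (a' == a'))
          rw [if_neg (by omega)]
          show ((y :: x :: a' : List String) == u :: v :: a') = ((x == v) && (y == u) && (a' == a'))
          cases hxv : x == v <;> cases hyu : y == u <;>
            simp_all [List.cons_beq_cons, Bool.and_comm]
        | cons l t =>
          have hne : a' ≠ b' := by
            intro he
            rw [he, (adiffsN_nil_iff b' b' rfl).mpr rfl] at hd
            simp at hd
          simp only [List.map_cons]
          show false = _
          simp [hne]

theorem B_cons_ne (x u : String) (a b : List String) (hlen : a.length = b.length)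
    (hxu : x ≠ u) :
    is_adjacent_order_swap_alt (x :: a) (u :: b)
      = (match a, b with
         | y :: a', v :: b' => (x == v) && (y == u) && (a' == b')
         | _, _ => false) := by
  simp only [is_adjacent_order_swap_alt, List.length_cons, hlen]
  rw [if_neg (by omega)]
  have hscan : pvScan (x :: a) (u :: b) (b.length + 1) 0 = 0 := by
    rw [pvScan, dif_neg (by simp [hxu])]
  rw [hscan]
  cases a with
  | nil =>
    have hb : b = [] := by cases b <;> simp_all
    subst hb
    simp
  | cons y a' =>
    cases b with
    | nil => simp at hlen
    | cons v b' =>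
      rw [if_neg (by simp)]
      simp [List.getD]

theorem AB_eq (a : List String) : ∀ (b : List String),
    is_adjacent_order_swap a b = is_adjacent_order_swap_alt a b := by
  induction a with
  | nil =>
    intro b
    cases b with
    | nil => decide
    | cons u b =>
      rw [is_adjacent_order_swap, if_pos (by simp), is_adjacent_order_swap_alt,
        if_pos (by simp)]
  | cons x a ih =>
    intro b
    cases b with
    | nil =>
      rw [is_adjacent_order_swap, if_pos (by simp), is_adjacent_order_swap_alt,
        if_pos (by simp)]
    | cons u b =>
      by_cases hlen : a.length = b.length
      · by_cases hxu : x = u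
        · subst hxu
          rw [A_cons_eq x a b hlen, B_cons_eq x a b hlen]
          exact ih b
        · rw [A_cons_ne x u a b hlen hxu, B_cons_ne x u a b hlen hxu]
      · rw [is_adjacent_order_swap, if_pos (by simp; omega), is_adjacent_order_swap_alt,
          if_pos (by simp; omega)]

-- ===== VERDICT (by name: the statement is the Claim_ definition above) =====
theorem is_adjacent_order_swap_spec : Claim_equal_is_adjacent_order_swap := by
  intro a b _
  exact AB_eq a b
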